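-- pv_equiv track=rewrite | github.com/dz902/betterbill | start.py | remove_leading_sql_comments
-- ===== SOURCE A (Python) =====
-- def remove_leading_sql_comments(sql_string):
--     sql_string = sql_string.strip()
--     lines = sql_string.split('\n')
--     cleaned_lines = []
--     skip_comments = True
--
--     for line in lines:
--         line = line.strip()
--         if skip_comments:
--             if line.startswith('--'):
--                 continue
--             else:
--                 skip_comments = False
--         cleaned_lines.append(line)
--
--     return '\n'.join(cleaned_lines)
-- ===== SOURCE B (Python) =====
-- def remove_leading_sql_comments(sql_string):
--     # Normalize: strip the whole string, strip each line, re-join into one text.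
--     text = '\n'.join(line.strip() for line in sql_string.strip().split('\n'))
--     # Chop leading comment lines off the joined text itself, one line at a time.
--     while text.startswith('--'):
--         text = text.partition('\n')[2]
--     return text
-- ===== Notes on version B (the rewrite author's own statement) =====
-- stated objective: alternative
-- what changed: B joins the stripped lines back into one text first and then removes leading comment lines from the joined string itself with a partition-based chop loop, instead of A's per-line loop with a skip_comments flag building a list of kept lines.
import Mathlib
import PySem

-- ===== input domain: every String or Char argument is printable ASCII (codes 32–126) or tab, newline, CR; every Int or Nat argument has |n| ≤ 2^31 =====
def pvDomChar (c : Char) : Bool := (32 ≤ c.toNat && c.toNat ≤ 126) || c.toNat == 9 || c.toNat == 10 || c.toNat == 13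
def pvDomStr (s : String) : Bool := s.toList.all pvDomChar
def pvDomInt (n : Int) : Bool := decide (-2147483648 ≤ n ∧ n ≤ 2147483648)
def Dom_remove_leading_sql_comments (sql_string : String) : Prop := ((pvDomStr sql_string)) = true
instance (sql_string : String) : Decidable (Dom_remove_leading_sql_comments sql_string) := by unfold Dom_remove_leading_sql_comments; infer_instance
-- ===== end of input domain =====

-- B normalizes the whole text first (strip, strip each line, re-join) and then chops leading
-- comment lines off the joined STRING itself with partition — no per-line flagged loop (alternative decomposition).

-- ===== PORT A =====
-- one loop step of A: state = (cleaned_lines, skip_comments)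
def pvStepA (st : List (List Char) × Bool) (line : List Char) : List (List Char) × Bool :=
  let line := PySem.Chars.strip line
  if st.2 then
    if PySem.Chars.startswith line ['-', '-'] then st
    else (st.1 ++ [line], false)
  else (st.1 ++ [line], st.2)

def remove_leading_sql_comments (sql_string : String) : String :=
  let stripped := PySem.Chars.strip sql_string.toList
  let lines := PySem.Chars.splitOn stripped ['\n']
  let res := lines.foldl pvStepA ([], true)
  String.mk (PySem.Chars.join ['\n'] res.1)

-- ===== PORT B =====
-- text.partition('\n')[2]: the part after the FIRST '\n', or '' if there is none (exact for a 1-char separator)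
def pvChopB (s : List Char) : List Char :=
  if ('\n' : Char) ∈ s then s.drop (s.idxOf '\n' + 1) else []

theorem pvChopB_len (s : List Char) (h : PySem.Chars.startswith s ['-', '-'] = true) :
    (pvChopB s).length < s.length := by
  have hs : s ≠ [] := by
    intro he; subst he; simp [PySem.Chars.startswith, List.isPrefixOf] at h
  unfold pvChopB
  split_ifs with hm
  · have := List.length_drop (l := s) (i := s.idxOf '\n' + 1)
    have hpos : 0 < s.length := List.length_pos_iff.mpr hs
    omega
  · simpa using List.length_pos_iff.mpr hs

-- while text.startswith('--'): text = text.partition('\n')[2]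
def pvDropB (s : List Char) : List Char :=
  if h : PySem.Chars.startswith s ['-', '-'] = true then pvDropB (pvChopB s) else s
termination_by s.length
decreasing_by exact pvChopB_len s h

def remove_leading_sql_comments_alt (sql_string : String) : String :=
  let text := PySem.Chars.join ['\n']
    ((PySem.Chars.splitOn (PySem.Chars.strip sql_string.toList) ['\n']).map PySem.Chars.strip)
  String.mk (pvDropB text)

-- ===== PRECONDITION & SPEC =====
def Spec_remove_leading_sql_comments (sql_string : String) (out : String) : Prop := out = remove_leading_sql_comments_alt sql_string
instance (sql_string : String) (out : String) : Decidable (Spec_remove_leading_sql_comments sql_string out) := by unfold Spec_remove_leading_sql_comments; infer_instance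

-- ===== CLAIM (what is proved, stated in full; the proofs are below) =====
def Claim_equal_remove_leading_sql_comments : Prop := ∀ (sql_string : String), Dom_remove_leading_sql_comments sql_string → Spec_remove_leading_sql_comments sql_string (remove_leading_sql_comments sql_string)

-- ===== LEMMAS AND PROOFS =====

-- once skip_comments is false, A just appends the stripped lines
theorem pvFoldA_false (lines : List (List Char)) (acc : List (List Char)) :
    (lines.foldl pvStepA (acc, false)).1 = acc ++ lines.map PySem.Chars.strip := by
  induction lines generalizing acc with
  | nil => simp
  | cons l t ih => simp [List.foldl, pvStepA, ih]

-- A's flagged loop computes dropWhile over the stripped lines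
theorem pvFoldA_true (lines : List (List Char)) :
    (lines.foldl pvStepA ([], true)).1
      = (lines.map PySem.Chars.strip).dropWhile (fun l => PySem.Chars.startswith l ['-', '-']) := by
  induction lines with
  | nil => simp
  | cons l t ih =>
      by_cases h : PySem.Chars.startswith (PySem.Chars.strip l) ['-', '-'] = true
      · simp [List.foldl, pvStepA, h, ih]
      · simp [List.foldl, pvStepA, h, pvFoldA_false]

-- whether the joined text starts with '--' is decided by its first line alone
theorem pvStartswith_join (l r : List Char) :
    PySem.Chars.startswith (l ++ '\n' :: r) ['-', '-'] = PySem.Chars.startswith l ['-', '-'] := by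
  match l with
  | [] => simp [PySem.Chars.startswith, List.isPrefixOf]
  | [c] => simp [PySem.Chars.startswith, List.isPrefixOf]
  | c1 :: c2 :: t => simp [PySem.Chars.startswith, List.isPrefixOf]

-- chopping at the first '\n' of (l ++ '\n' :: r) yields r, when l has no '\n'
theorem pvChopB_append (l r : List Char) (h : ('\n' : Char) ∉ l) :
    pvChopB (l ++ '\n' :: r) = r := by
  unfold pvChopB
  have hm : ('\n' : Char) ∈ l ++ '\n' :: r := by simp
  have hidx : (l ++ '\n' :: r).idxOf '\n' = l.length := by
    induction l with
    | nil => simp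
    | cons c t ih =>
        have hc : c ≠ '\n' := by intro he; exact h (by simp [he])
        have ht : ('\n' : Char) ∉ t := fun hm => h (List.mem_cons_of_mem _ hm)
        simp [List.idxOf_cons, hc, Ne.symm hc, ih ht]
  rw [if_pos hm, hidx]
  have : l ++ '\n' :: r = (l ++ ['\n']) ++ r := by simp
  rw [this]
  have hlen : l.length + 1 = (l ++ ['\n']).length := by simp
  rw [hlen, List.drop_left]

-- the string-level chop loop over the joined lines = dropWhile over the lines, then join
theorem pvDropB_join (ls : List (List Char)) (h : ∀ l ∈ ls, ('\n' : Char) ∉ l) :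
    pvDropB (PySem.Chars.join ['\n'] ls)
      = PySem.Chars.join ['\n'] (ls.dropWhile fun l => PySem.Chars.startswith l ['-', '-']) := by
  induction ls with
  | nil =>
      rw [pvDropB]
      simp [PySem.Chars.join, PySem.Chars.startswith, List.isPrefixOf, List.intercalate]
  | cons l t ih =>
      have hl : ('\n' : Char) ∉ l := h l (List.mem_cons_self)
      have ht : ∀ x ∈ t, ('\n' : Char) ∉ x := fun x hx => h x (List.mem_cons_of_mem _ hx)
      cases t with
      | nil =>
          have hjoin : PySem.Chars.join ['\n'] [l] = l := by
            simp [PySem.Chars.join, List.intercalate]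
          by_cases hs : PySem.Chars.startswith l ['-', '-'] = true
          · rw [hjoin, pvDropB, dif_pos hs]
            have hchop : pvChopB l = [] := by
              unfold pvChopB; rw [if_neg hl]
            rw [hchop, pvDropB]
            have hs' : List.isPrefixOf ['-', '-'] l = true := by
              simpa [PySem.Chars.startswith] using hs
            simp [PySem.Chars.startswith, List.dropWhile, hs', PySem.Chars.join,
                  List.intercalate]
          · rw [hjoin, pvDropB, dif_neg hs]
            simp [List.dropWhile, hs, hjoin]
      | cons t0 tt =>
          have hjoin : PySem.Chars.join ['\n'] (l :: t0 :: tt)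
              = l ++ '\n' :: PySem.Chars.join ['\n'] (t0 :: tt) := by
            simp [PySem.Chars.join, List.intercalate, List.intersperse]
          by_cases hs : PySem.Chars.startswith l ['-', '-'] = true
          · rw [hjoin, pvDropB, dif_pos (by rw [pvStartswith_join]; exact hs)]
            rw [pvChopB_append _ _ hl, ih ht]
            simp [List.dropWhile, hs]
          · rw [hjoin, pvDropB, dif_neg (fun hc => hs (by rw [← pvStartswith_join l (PySem.Chars.join ['\n'] (t0 :: tt))]; exact hc)), ← hjoin]
            simp [List.dropWhile, hs]

-- pieces produced by split('\n') contain no '\n'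
theorem pvSplitOnGo_no_nl : ∀ (fuel : Nat) (l cur : List Char) (acc : List (List Char)),
    l.length < fuel → (('\n' : Char) ∉ cur) → (∀ p ∈ acc, ('\n' : Char) ∉ p) →
    ∀ p ∈ PySem.Chars.splitOn.go ['\n'] fuel l cur acc, ('\n' : Char) ∉ p := by
  intro fuel
  induction fuel with
  | zero => intro l cur acc hlen; omega
  | succ n ih =>
      intro l cur acc hlen hcur hacc p hp
      cases l with
      | nil =>
          rw [PySem.Chars.splitOn.go] at hp
          simp only [List.mem_reverse, List.mem_cons] at hp
          rcases hp with h | h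
          · subst h; simpa using hcur
          · exact hacc p h
          all_goals omega
      | cons c rest =>
          rw [PySem.Chars.splitOn.go] at hp
          by_cases hc : c = '\n'
          · subst hc
            rw [if_pos (by simp [List.isPrefixOf])] at hp
            refine ih (List.drop ['\n'].length ('\n' :: rest)) [] (cur.reverse :: acc) ?_ (by simp) ?_ p ?_
            · simp at hlen ⊢; omega
            · intro q hq
              rcases List.mem_cons.mp hq with h | h
              · subst h; simpa using hcur
              · exact hacc q h
            · simpa using hp
          · rw [if_neg (by simp [List.isPrefixOf]; intro he; exact hc he.symm)] at hp
            refine ih rest (c :: cur) acc ?_ ?_ hacc p hp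
            · simp at hlen ⊢; omega
            · intro hm
              rcases List.mem_cons.mp hm with h | h
              · exact hc h.symm
              · exact hcur h

theorem pvSplitOn_no_nl (s : List Char) :
    ∀ p ∈ PySem.Chars.splitOn s ['\n'], ('\n' : Char) ∉ p := by
  intro p hp
  exact pvSplitOnGo_no_nl (s.length + 1) s [] [] (by omega) (by simp) (by simp) p hp

theorem pvStrip_no_nl (l : List Char) (h : ('\n' : Char) ∉ l) :
    ('\n' : Char) ∉ PySem.Chars.strip l := by
  intro hm
  apply h
  simp only [PySem.Chars.strip, PySem.Chars.rstrip, PySem.Chars.lstrip, List.mem_reverse] at hm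
  have h1 : ('\n' : Char) ∈ (List.dropWhile PySem.Chars.isspace l).reverse :=
    (List.dropWhile_sublist _).subset hm
  rw [List.mem_reverse] at h1
  exact (List.dropWhile_sublist _).subset h1

-- ===== VERDICT (by name: the statement is the Claim_ definition above) =====
theorem remove_leading_sql_comments_spec : Claim_equal_remove_leading_sql_comments := by
  intro s _
  unfold Spec_remove_leading_sql_comments remove_leading_sql_comments remove_leading_sql_comments_alt
  simp only [pvFoldA_true]
  rw [pvDropB_join]
  intro l hl
  rcases List.mem_map.mp hl with ⟨q, hq, rfl⟩
  exact pvStrip_no_nl q (pvSplitOn_no_nl _ q hq)
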